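-- pv_equiv track=rewrite | github.com/DonggeonOh/algorithm-python | algorithm/problems/hackerrank/miscellaneous/friend_circle_queries.py | max_circle_temp
-- ===== SOURCE A (Python) =====
-- def max_circle_temp(queries):
--     """
--     해커랭크 Friend Circle Queries 솔루션
--
--     테스트 케이스 반 정도가 시간초과 발생함
--     Union find 개념 숙지 후 재구현 필요
--
--     @Date: 2021/12/24
--     @Author: Oh Donggeon
--     @Link: https://www.hackerrank.com/challenges/friend-circle-queries
--     """
--     circle_list = list()
--     answer = list()
--     max_len = 0
--
--     for query in queries:
--         friend_set = {query[0], query[1]}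
--         temp_circle_list = list()
--
--         for circle in circle_list:
--             if not friend_set.isdisjoint(circle):
--                 friend_set.update(circle)
--             else:
--                 temp_circle_list.append(circle)
--
--         temp_circle_list.append(friend_set)
--         circle_list = temp_circle_list
--
--         max_len = max(max_len, len(friend_set))
--         answer.append(max_len)
--
--     return answer
-- ===== SOURCE B (Python) =====
-- def _locate(comp, members, x):
--     """Return x's circle representative, registering x as a new singleton circle if unseen."""
--     r = comp.get(x)
--     if r is None:
--         r = x
--         comp[x] = x
--         members[x] = [x]
--     return r
--
--
-- def max_circle_temp(queries):
--     # Weighted quick-find: comp maps node -> representative, members maps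
--     # representative -> list of circle members; each union relabels only the
--     # smaller circle, keeping a running maximum circle size.
--     comp = {}
--     members = {}
--     answer = []
--     best = 0
--     for query in queries:
--         ra = _locate(comp, members, query[0])
--         rb = _locate(comp, members, query[1])
--         if ra != rb:
--             if len(members[ra]) < len(members[rb]):
--                 ra, rb = rb, ra
--             for x in members[rb]:
--                 comp[x] = ra
--             members[ra].extend(members[rb])
--             del members[rb]
--         size = len(members[ra])
--         if size > best:
--             best = size
--         answer.append(best)
--     return answer
-- ===== Notes on version B (the rewrite author's own statement) =====
-- stated objective: alternative
-- what changed: A rescans the whole list of circle sets on every query and rebuilds it with set merges; B keeps a weighted quick-find (node-to-representative dict plus representative-to-members dict), relabelling only the smaller circle on each union while tracking the running maximum size.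
import Mathlib
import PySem

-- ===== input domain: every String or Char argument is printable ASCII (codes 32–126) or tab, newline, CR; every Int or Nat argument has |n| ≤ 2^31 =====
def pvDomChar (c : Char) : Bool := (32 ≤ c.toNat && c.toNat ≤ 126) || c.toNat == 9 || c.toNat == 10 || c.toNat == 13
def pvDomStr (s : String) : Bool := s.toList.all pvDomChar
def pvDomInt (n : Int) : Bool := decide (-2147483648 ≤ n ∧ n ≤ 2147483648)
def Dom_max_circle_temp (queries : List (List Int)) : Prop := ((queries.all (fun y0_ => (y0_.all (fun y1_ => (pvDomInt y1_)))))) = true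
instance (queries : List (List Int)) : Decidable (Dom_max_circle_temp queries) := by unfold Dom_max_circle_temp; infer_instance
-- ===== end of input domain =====

-- B replaces A's rescan-and-merge over the whole list of circle sets by a weighted
-- quick-find (node → representative, representative → member list, merge the smaller
-- circle into the larger one), tracking the running maximum circle size.

-- ===== PORT A =====
-- one query of A's outer loop (query[0]/query[1] read with default 0: IndexError on
-- len < 2 is excluded by Pre_max_circle_temp)
def pvAstep (st : List (PySem.Set Int) × List Int × Int) (query : List Int) :
    List (PySem.Set Int) × List Int × Int :=
  let friend_set0 : PySem.Set Int :=
    PySem.Set.ofList [PySem.List.pyGetD query 0 0, PySem.List.pyGetD query 1 0]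
  -- inner loop over circle_list building (friend_set, temp_circle_list)
  let r := st.1.foldl
    (fun (s : PySem.Set Int × List (PySem.Set Int)) (circle : PySem.Set Int) =>
      if !(PySem.Set.isdisjoint s.1 circle) then (PySem.Set.update s.1 circle, s.2)
      else (s.1, s.2 ++ [circle]))
    (friend_set0, [])
  let max_len := max st.2.2 (PySem.Set.len r.1)
  (r.2 ++ [r.1], st.2.1 ++ [max_len], max_len)

def max_circle_temp (queries : List (List Int)) : List Int :=
  (queries.foldl pvAstep ([], [], 0)).2.1

-- ===== PORT B =====
-- Source B's _locate: representative of x, registering a fresh singleton circle if unseen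
def pvLocate (comp : PySem.Dict Int Int) (members : PySem.Dict Int (List Int)) (x : Int) :
    Int × PySem.Dict Int Int × PySem.Dict Int (List Int) :=
  match comp.get? x with
  | some r => (r, comp, members)
  | none => (x, comp.insert x x, members.insert x [x])

-- one query of B's loop (members[r] read with default []: the key is always present)
def pvBstep (st : PySem.Dict Int Int × PySem.Dict Int (List Int) × List Int × Int)
    (query : List Int) : PySem.Dict Int Int × PySem.Dict Int (List Int) × List Int × Int :=
  let la := pvLocate st.1 st.2.1 (PySem.List.pyGetD query 0 0)
  let lb := pvLocate la.2.1 la.2.2 (PySem.List.pyGetD query 1 0)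
  let comp := lb.2.1
  let members := lb.2.2
  let merged :=
    if la.1 ≠ lb.1 then
      let swap := (members.getD la.1 []).length < (members.getD lb.1 []).length
      let ra := if swap then lb.1 else la.1
      let rb := if swap then la.1 else lb.1
      let mb := members.getD rb []
      (ra, mb.foldl (fun c x => c.insert x ra) comp,
       (members.insert ra (members.getD ra [] ++ mb)).erase rb)
    else (la.1, comp, members)
  let size : Int := ((merged.2.2.getD merged.1 []).length : Int)
  let best := if size > st.2.2.2 then size else st.2.2.2
  (merged.2.1, merged.2.2, st.2.2.1 ++ [best], best)

def max_circle_temp_alt (queries : List (List Int)) : List Int :=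
  (queries.foldl pvBstep (PySem.Dict.empty, PySem.Dict.empty, [], 0)).2.2.1

-- ===== PRECONDITION & SPEC =====
-- Pre_ excludes queries with fewer than two entries, on which A raises IndexError.
def Pre_max_circle_temp (queries : List (List Int)) : Prop :=
  ∀ q ∈ queries, 2 ≤ q.length
instance (queries : List (List Int)) : Decidable (Pre_max_circle_temp queries) := by
  unfold Pre_max_circle_temp; infer_instance

def pvWitness_max_circle_temp : List (List Int) := [[1, 2], [3, 4], [2, 3]]

def Spec_max_circle_temp (queries : List (List Int)) (out : List Int) : Prop := out = max_circle_temp_alt queries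
instance (queries : List (List Int)) (out : List Int) : Decidable (Spec_max_circle_temp queries out) := by unfold Spec_max_circle_temp; infer_instance

-- ===== CLAIM (what is proved, stated in full; the proofs are below) =====
def Claim_equal_max_circle_temp : Prop := ∀ (queries : List (List Int)), Dom_max_circle_temp queries → Pre_max_circle_temp queries → Spec_max_circle_temp queries (max_circle_temp queries)

-- ===== LEMMAS AND PROOFS =====

def pvDisj (c d : List Int) : Prop := ∀ x ∈ c, x ∉ d
def pvInvA (circles : List (PySem.Set Int)) : Prop :=
  circles.Pairwise pvDisj ∧ ∀ c ∈ circles, c.Nodup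
theorem pvcircle_unique {circles : List (PySem.Set Int)} (hA : pvInvA circles)
    {c d : PySem.Set Int} {y : Int} (hc : c ∈ circles) (hd : d ∈ circles)
    (hyc : y ∈ c) (hyd : y ∈ d) : c = d := by
  rcases List.mem_iff_getElem.mp hc with ⟨i, hi, rfl⟩
  rcases List.mem_iff_getElem.mp hd with ⟨j, hj, rfl⟩
  rcases lt_trichotomy i j with h | h | h
  · exact absurd hyd (List.pairwise_iff_getElem.mp hA.1 i j hi hj h y hyc)
  · simp [h]
  · exact absurd hyc (List.pairwise_iff_getElem.mp hA.1 j i hj hi h y hyd)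
theorem pvinner_spec (circles : List (PySem.Set Int)) (fs : PySem.Set Int)
    (temp : List (PySem.Set Int))
    (hpw : circles.Pairwise pvDisj) (hnd : ∀ c ∈ circles, c.Nodup) (hfs : fs.Nodup) :
    (circles.foldl
      (fun (s : PySem.Set Int × List (PySem.Set Int)) (circle : PySem.Set Int) =>
        if !(PySem.Set.isdisjoint s.1 circle) then (PySem.Set.update s.1 circle, s.2)
        else (s.1, s.2 ++ [circle])) (fs, temp)).1.Nodup ∧
    (∀ y, y ∈ (circles.foldl
      (fun (s : PySem.Set Int × List (PySem.Set Int)) (circle : PySem.Set Int) =>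
        if !(PySem.Set.isdisjoint s.1 circle) then (PySem.Set.update s.1 circle, s.2)
        else (s.1, s.2 ++ [circle])) (fs, temp)).1 ↔
        y ∈ fs ∨ ∃ c ∈ circles, (∃ x ∈ fs, x ∈ c) ∧ y ∈ c) ∧
    (circles.foldl
      (fun (s : PySem.Set Int × List (PySem.Set Int)) (circle : PySem.Set Int) =>
        if !(PySem.Set.isdisjoint s.1 circle) then (PySem.Set.update s.1 circle, s.2)
        else (s.1, s.2 ++ [circle])) (fs, temp)).2
      = temp ++ circles.filter (fun c => PySem.Set.isdisjoint fs c) := by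
  induction circles generalizing fs temp with
  | nil => exact ⟨hfs, by simp, by simp⟩
  | cons c rest ih =>
    have hpw' : rest.Pairwise pvDisj := hpw.tail
    have hcrest : ∀ d ∈ rest, pvDisj c d := fun d hd => List.rel_of_pairwise_cons hpw hd
    have hnd' : ∀ d ∈ rest, d.Nodup := fun d hd => hnd d (List.mem_cons_of_mem _ hd)
    by_cases hdis : PySem.Set.isdisjoint fs c = true
    · -- c disjoint from fs: kept in temp, fs unchanged
      rcases ih fs (temp ++ [c]) hpw' hnd' hfs with ⟨n1, m1, t1⟩
      have hdisP : ∀ x ∈ fs, x ∉ c := (PySem.Set.isdisjoint_iff fs c).mp hdis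
      have hstep : ((c :: rest).foldl
          (fun (s : PySem.Set Int × List (PySem.Set Int)) (circle : PySem.Set Int) =>
            if !(PySem.Set.isdisjoint s.1 circle) then (PySem.Set.update s.1 circle, s.2)
            else (s.1, s.2 ++ [circle])) (fs, temp))
          = (rest.foldl
            (fun (s : PySem.Set Int × List (PySem.Set Int)) (circle : PySem.Set Int) =>
              if !(PySem.Set.isdisjoint s.1 circle) then (PySem.Set.update s.1 circle, s.2)
              else (s.1, s.2 ++ [circle])) (fs, temp ++ [c])) := by
        simp [List.foldl_cons, hdis]
      refine ⟨?_, ?_, ?_⟩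
      · rw [hstep]; exact n1
      · intro y
        rw [hstep, m1 y]
        constructor
        · rintro (h | ⟨d, hd, hx, hy⟩)
          · exact Or.inl h
          · exact Or.inr ⟨d, List.mem_cons_of_mem _ hd, hx, hy⟩
        · rintro (h | ⟨d, hd, ⟨x, hxfs, hxd⟩, hy⟩)
          · exact Or.inl h
          · rcases List.mem_cons.mp hd with rfl | hd'
            · exact absurd hxd (hdisP x hxfs)
            · exact Or.inr ⟨d, hd', ⟨x, hxfs, hxd⟩, hy⟩
      · rw [hstep, t1, List.filter_cons_of_pos (by simpa using hdis)]
        simp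
    · -- c intersects fs: merged into fs
      have hint : ∃ x ∈ fs, x ∈ c := by
        by_contra h
        push Not at h
        exact hdis ((PySem.Set.isdisjoint_iff fs c).mpr h)
      have hfs' : (PySem.Set.update fs c).Nodup :=
        PySem.Set.nodup_update fs c hfs
      rcases ih (PySem.Set.update fs c) temp hpw' hnd' hfs' with ⟨n1, m1, t1⟩
      have hstep : ((c :: rest).foldl
          (fun (s : PySem.Set Int × List (PySem.Set Int)) (circle : PySem.Set Int) =>
            if !(PySem.Set.isdisjoint s.1 circle) then (PySem.Set.update s.1 circle, s.2)
            else (s.1, s.2 ++ [circle])) (fs, temp))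
          = (rest.foldl
            (fun (s : PySem.Set Int × List (PySem.Set Int)) (circle : PySem.Set Int) =>
              if !(PySem.Set.isdisjoint s.1 circle) then (PySem.Set.update s.1 circle, s.2)
              else (s.1, s.2 ++ [circle])) (PySem.Set.update fs c, temp)) := by
        simp [List.foldl_cons, hdis]
      -- membership in update fs c, and intersect-update transfer for d ∈ rest
      have hmemu : ∀ y : Int, y ∈ PySem.Set.update fs c ↔ y ∈ fs ∨ y ∈ c :=
        fun y => PySem.Set.mem_update fs c y
      have htrans : ∀ d ∈ rest, ((∃ x ∈ PySem.Set.update fs c, x ∈ d) ↔ (∃ x ∈ fs, x ∈ d)) := by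
        intro d hd
        constructor
        · rintro ⟨x, hxu, hxd⟩
          rcases (hmemu x).mp hxu with h | h
          · exact ⟨x, h, hxd⟩
          · exact absurd hxd (hcrest d hd x h)
        · rintro ⟨x, hx, hxd⟩
          exact ⟨x, (hmemu x).mpr (Or.inl hx), hxd⟩
      refine ⟨?_, ?_, ?_⟩
      · rw [hstep]; exact n1
      · intro y
        rw [hstep, m1 y]
        constructor
        · rintro (h | ⟨d, hd, hx, hy⟩)
          · rcases (hmemu y).mp h with h | h
            · exact Or.inl h
            · exact Or.inr ⟨c, List.mem_cons_self, hint, h⟩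
          · exact Or.inr ⟨d, List.mem_cons_of_mem _ hd, (htrans d hd).mp hx, hy⟩
        · rintro (h | ⟨d, hd, hx, hy⟩)
          · exact Or.inl ((hmemu y).mpr (Or.inl h))
          · rcases List.mem_cons.mp hd with rfl | hd'
            · exact Or.inl ((hmemu y).mpr (Or.inr hy))
            · exact Or.inr ⟨d, hd', (htrans d hd').mpr hx, hy⟩
      · rw [hstep, t1, List.filter_cons_of_neg (by simpa using hdis)]
        congr 1
        apply List.filter_congr
        intro d hd
        rw [Bool.eq_iff_iff, PySem.Set.isdisjoint_iff, PySem.Set.isdisjoint_iff]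
        constructor
        · intro h x hx
          exact h x ((hmemu x).mpr (Or.inl hx))
        · intro h x hx
          rcases (hmemu x).mp hx with h2 | h2
          · exact h x h2
          · exact hcrest d hd x h2
def pvInvB (comp : PySem.Dict Int Int) (members : PySem.Dict Int (List Int)) : Prop :=
  (∀ r m, members.get? r = some m → m.Nodup ∧ ∀ y, (y ∈ m ↔ comp.get? y = some r)) ∧
  (∀ x r, comp.get? x = some r → (members.get? r).isSome = true) ∧
  (∀ r m, members.get? r = some m → comp.get? r = some r)
theorem pvno_fiber_of_fresh {comp : PySem.Dict Int Int} {members : PySem.Dict Int (List Int)}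
    (h : pvInvB comp members) {x : Int} (hx : comp.get? x = none) :
    ∀ y, comp.get? y ≠ some x := by
  intro y hy
  rcases h with ⟨_, h2, h3⟩
  rcases Option.isSome_iff_exists.mp (h2 y x hy) with ⟨m, hm⟩
  have := h3 x m hm
  simp [hx] at this
theorem pvget?_erase {ν : Type} (d : PySem.Dict Int ν) (k k' : Int) :
    (d.erase k).get? k' = if k' = k then none else d.get? k' := by
  rcases d with ⟨items⟩
  induction items with
  | nil => simp [PySem.Dict.erase, PySem.Dict.get?]
  | cons p t ih =>
    simp only [PySem.Dict.erase, PySem.Dict.get?, List.filter_cons] at *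
    by_cases h1 : p.1 = k <;> by_cases h2 : p.1 = k' <;> simp_all [BEq.beq]
theorem pvfoldl_insert_get? (mb : List Int) (comp : PySem.Dict Int Int) (r y : Int) :
    (mb.foldl (fun c x => c.insert x r) comp).get? y
      = if y ∈ mb then some r else comp.get? y := by
  induction mb generalizing comp with
  | nil => simp
  | cons x t ih =>
    simp only [List.foldl_cons, ih, List.mem_cons]
    by_cases hy : y ∈ t <;> by_cases hx : y = x <;> simp_all [PySem.Dict.get?_insert]

theorem pvlocate_spec (comp : PySem.Dict Int Int) (members : PySem.Dict Int (List Int))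
    (x : Int) (h : pvInvB comp members) :
    pvInvB (pvLocate comp members x).2.1 (pvLocate comp members x).2.2 ∧
    (pvLocate comp members x).2.1.get? x = some (pvLocate comp members x).1 ∧
    (∀ y r, comp.get? y = some r → (pvLocate comp members x).2.1.get? y = some r) ∧
    (∀ y r, (pvLocate comp members x).2.1.get? y = some r →
      comp.get? y = some r ∨ (y = x ∧ r = x ∧ comp.get? x = none)) ∧
    (comp.get? x = none → (pvLocate comp members x).1 = x) := by
  rcases hx : comp.get? x with _ | s
  · -- fresh
    have hnf := pvno_fiber_of_fresh h hx
    obtain ⟨h1, h2, h3⟩ := h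
    simp only [pvLocate, hx]
    refine ⟨⟨?_, ?_, ?_⟩, ?_, ?_, ?_, ?_⟩
    · intro r m hm
      rw [PySem.Dict.get?_insert] at hm
      by_cases hr : r = x
      · rw [if_pos hr] at hm
        injection hm with hm
        subst hm
        rw [hr]
        refine ⟨List.nodup_singleton x, fun y => ?_⟩
        by_cases hy : y = x <;> simp [PySem.Dict.get?_insert, hy, hnf y]
      · rw [if_neg hr] at hm
        rcases h1 r m hm with ⟨hnd, hmem⟩
        refine ⟨hnd, fun y => ?_⟩
        rw [PySem.Dict.get?_insert]
        by_cases hy : y = x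
        · subst hy
          rw [if_pos rfl]
          constructor
          · intro hxm
            have := (hmem y).mp hxm
            rw [hx] at this
            cases this
          · intro hsome
            exact absurd (by simpa using hsome.symm) hr
        · rw [if_neg hy]; exact hmem y
    · intro z r hz
      rw [PySem.Dict.get?_insert] at hz
      rw [PySem.Dict.get?_insert]
      by_cases hzx : z = x
      · rw [if_pos hzx] at hz
        have : r = x := by simpa using hz.symm
        simp [this]
      · rw [if_neg hzx] at hz
        by_cases hrx : r = x
        · exact absurd hz (by subst hrx; exact hnf z)
        · rw [if_neg hrx]; exact h2 z r hz
    · intro r m hm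
      rw [PySem.Dict.get?_insert] at hm
      rw [PySem.Dict.get?_insert]
      by_cases hr : r = x
      · simp [hr]
      · rw [if_neg hr] at hm; rw [if_neg hr]; exact h3 r m hm
    · simp
    · intro y r hy
      rw [PySem.Dict.get?_insert]
      by_cases hyx : y = x
      · exact absurd hy (by subst hyx; rw [hx]; simp)
      · rw [if_neg hyx]; exact hy
    · intro y r hy
      rw [PySem.Dict.get?_insert] at hy
      by_cases hyx : y = x
      · rw [if_pos hyx] at hy
        right
        exact ⟨hyx, by simpa using hy.symm, trivial⟩
      · rw [if_neg hyx] at hy; exact Or.inl hy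
    · trivial
  · simp only [pvLocate, hx]
    refine ⟨h, ?_, fun y r hy => hy, fun y r hy => Or.inl hy, fun hno => ?_⟩
    · trivial
    · exact absurd hno (by simp)

theorem pvmerge_spec (comp2 : PySem.Dict Int Int) (members2 : PySem.Dict Int (List Int))
    (u v : Int) (hB : pvInvB comp2 members2) (huv : u ≠ v)
    (hu : comp2.get? u = some u) (hv : comp2.get? v = some v) :
    pvInvB ((members2.getD v []).foldl (fun c x => c.insert x u) comp2)
        ((members2.insert u (members2.getD u [] ++ members2.getD v [])).erase v) ∧
    (∀ y, ((members2.getD v []).foldl (fun c x => c.insert x u) comp2).get? y = some u ↔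
      (comp2.get? y = some u ∨ comp2.get? y = some v)) ∧
    (∀ y r, r ≠ u → (((members2.getD v []).foldl (fun c x => c.insert x u) comp2).get? y = some r ↔
      (comp2.get? y = some r ∧ r ≠ v))) ∧
    ((members2.insert u (members2.getD u [] ++ members2.getD v [])).erase v).getD u []
      = members2.getD u [] ++ members2.getD v [] ∧
    (members2.getD u [] ++ members2.getD v []).Nodup ∧
    (∀ y, y ∈ members2.getD u [] ++ members2.getD v [] ↔
      (comp2.get? y = some u ∨ comp2.get? y = some v)) := by
  obtain ⟨h1, h2, h3⟩ := hB
  rcases Option.isSome_iff_exists.mp (h2 u u hu) with ⟨mu, hmu⟩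
  rcases Option.isSome_iff_exists.mp (h2 v v hv) with ⟨mv, hmv⟩
  have hgu : members2.getD u [] = mu := by rw [PySem.Dict.getD_eq_get?_getD, hmu]; rfl
  have hgv : members2.getD v [] = mv := by rw [PySem.Dict.getD_eq_get?_getD, hmv]; rfl
  rcases h1 u mu hmu with ⟨hndu, hmemu⟩
  rcases h1 v mv hmv with ⟨hndv, hmemv⟩
  -- characterizations of the final dicts
  have hcF : ∀ y, ((members2.getD v []).foldl (fun c x => c.insert x u) comp2).get? y
      = if comp2.get? y = some v then some u else comp2.get? y := by
    intro y
    rw [hgv, pvfoldl_insert_get?]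
    by_cases hy : y ∈ mv
    · rw [if_pos hy, if_pos ((hmemv y).mp hy)]
    · rw [if_neg hy, if_neg (fun hc => hy ((hmemv y).mpr hc))]
  have hmF : ∀ r, ((members2.insert u (members2.getD u [] ++ members2.getD v [])).erase v).get? r
      = if r = v then none else if r = u then some (mu ++ mv) else members2.get? r := by
    intro r
    rw [pvget?_erase, PySem.Dict.get?_insert, hgu, hgv]
  have hndsum : (mu ++ mv).Nodup := by
    rw [List.nodup_append]
    refine ⟨hndu, hndv, fun y hyu z hzv hyz => ?_⟩
    have h1' := (hmemu y).mp hyu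
    have h2' := (hmemv z).mp hzv
    rw [← hyz, h1'] at h2'
    exact huv (by simpa using h2')
  have hmemsum : ∀ y, y ∈ mu ++ mv ↔ (comp2.get? y = some u ∨ comp2.get? y = some v) := by
    intro y
    rw [List.mem_append, hmemu y, hmemv y]
  refine ⟨⟨?_, ?_, ?_⟩, ?_, ?_, ?_, ?_, ?_⟩
  · -- W1
    intro r m hm
    rw [hmF] at hm
    by_cases hrv : r = v
    · rw [if_pos hrv] at hm; cases hm
    · rw [if_neg hrv] at hm
      by_cases hru : r = u
      · rw [if_pos hru] at hm
        injection hm with hm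
        subst hm
        subst hru
        refine ⟨hndsum, fun y => ?_⟩
        rw [hmemsum y, hcF y]
        by_cases hyv : comp2.get? y = some v
        · simp [hyv]
        · simp [hyv]
      · rw [if_neg hru] at hm
        rcases h1 r m hm with ⟨hnd, hmem⟩
        refine ⟨hnd, fun y => ?_⟩
        rw [hmem y, hcF y]
        by_cases hyv : comp2.get? y = some v
        · rw [if_pos hyv, hyv]
          constructor
          · intro hh
            exact absurd (Eq.symm (by simpa using hh)) hrv
          · intro hh
            exact absurd (by simpa using hh) (fun h : u = r => hru h.symm)
        · rw [if_neg hyv]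
  · -- W2
    intro x r hx
    rw [hcF] at hx
    rw [hmF]
    by_cases hxv : comp2.get? x = some v
    · rw [if_pos hxv] at hx
      injection hx with hx
      subst hx
      rw [if_neg huv]
      simp
    · rw [if_neg hxv] at hx
      by_cases hrv : r = v
      · exact absurd hx (by rw [hrv]; exact hxv)
      · rw [if_neg hrv]
        by_cases hru : r = u
        · rw [if_pos hru]; simp
        · rw [if_neg hru]
          exact h2 x r hx
  · -- W3
    intro r m hm
    rw [hmF] at hm
    rw [hcF]
    by_cases hrv : r = v
    · rw [if_pos hrv] at hm; cases hm
    · rw [if_neg hrv] at hm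
      by_cases hru : r = u
      · subst hru
        rw [if_neg (by simp [hu, huv])]
        exact hu
      · rw [if_neg hru] at hm
        have := h3 r m hm
        rw [if_neg (by simp [this, hrv])]
        exact this
  · -- fiber of u
    intro y
    rw [hcF]
    by_cases hyv : comp2.get? y = some v
    · simp [hyv]
    · simp [hyv]
  · -- other fibers
    intro y r hru
    rw [hcF]
    by_cases hyv : comp2.get? y = some v
    · rw [if_pos hyv]
      constructor
      · intro hh
        exact absurd (by simpa using hh) (fun h : u = r => hru h.symm)
      · rintro ⟨hh, hrv⟩
        rw [hyv] at hh
        exact absurd (show r = v by simpa using hh.symm) hrv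
    · rw [if_neg hyv]
      constructor
      · intro hh
        refine ⟨hh, fun hrv => ?_⟩
        rw [hrv] at hh
        exact hyv hh
      · exact fun hh => hh.1
  · rw [PySem.Dict.getD_eq_get?_getD, hmF]
    rw [if_neg huv, if_pos rfl, hgu, hgv]
    rfl
  · rw [hgu, hgv]; exact hndsum
  · rw [hgu, hgv]; exact hmemsum

-- fsMem: who belongs to the new merged circle
def pvFsMem (circles : List (PySem.Set Int)) (a b y : Int) : Prop :=
  y = a ∨ y = b ∨ (∃ c ∈ circles, y ∈ c ∧ a ∈ c) ∨ (∃ c ∈ circles, y ∈ c ∧ b ∈ c)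

def pvRel (circles : List (PySem.Set Int)) (comp : PySem.Dict Int Int) : Prop :=
  ∀ x y : Int, (∃ c ∈ circles, x ∈ c ∧ y ∈ c) ↔
    (∃ r, comp.get? x = some r ∧ comp.get? y = some r)

theorem pvabstract_step
    (circles : List (PySem.Set Int)) (comp : PySem.Dict Int Int)
    (members : PySem.Dict Int (List Int))
    (a b ra rb u : Int) (comp2 compF : PySem.Dict Int Int) (fs : PySem.Set Int)
    (hA : pvInvA circles) (hB : pvInvB comp members) (hRel : pvRel circles comp)
    (hQ2a : comp2.get? a = some ra) (hQ2b : comp2.get? b = some rb)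
    (hQ3 : ∀ y r, comp.get? y = some r → comp2.get? y = some r)
    (hQ4 : ∀ y r, comp2.get? y = some r → comp.get? y = some r ∨ y = a ∨ y = b)
    (hQ7a : comp.get? a = none → ra = a) (hQ7b : comp.get? b = none → rb = b)
    (hu : u = ra ∨ u = rb)
    (h2 : ∀ y, compF.get? y = some u ↔ (comp2.get? y = some ra ∨ comp2.get? y = some rb))
    (h3 : ∀ y r, r ≠ u → (compF.get? y = some r ↔ (comp2.get? y = some r ∧ r ≠ ra ∧ r ≠ rb)))
    (hfsnd : fs.Nodup)
    (hfsmem : ∀ y, y ∈ fs ↔ pvFsMem circles a b y) :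
    (∀ y, (comp2.get? y = some ra ∨ comp2.get? y = some rb) ↔ y ∈ fs) ∧
    pvInvA (circles.filter (fun c => PySem.Set.isdisjoint (PySem.Set.ofList [a, b]) c) ++ [fs]) ∧
    pvRel (circles.filter (fun c => PySem.Set.isdisjoint (PySem.Set.ofList [a, b]) c) ++ [fs]) compF := by
  -- comp a is either fresh (ra = a, no fiber) or some ra
  have hcases_a : comp.get? a = some ra ∨ (ra = a ∧ ∀ y, comp.get? y ≠ some ra) := by
    rcases hca : comp.get? a with _ | s
    · exact Or.inr ⟨hQ7a hca, by rw [hQ7a hca]; exact pvno_fiber_of_fresh hB hca⟩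
    · left
      have h := hQ3 a s hca
      rw [hQ2a] at h
      injection h with h
      rw [h]
  have hcases_b : comp.get? b = some rb ∨ (rb = b ∧ ∀ y, comp.get? y ≠ some rb) := by
    rcases hcb : comp.get? b with _ | s
    · exact Or.inr ⟨hQ7b hcb, by rw [hQ7b hcb]; exact pvno_fiber_of_fresh hB hcb⟩
    · left
      have h := hQ3 b s hcb
      rw [hQ2b] at h
      injection h with h
      rw [h]
  -- S3: the pair fiber of comp2 is exactly fs
  have hS3 : ∀ y, (comp2.get? y = some ra ∨ comp2.get? y = some rb) ↔ y ∈ fs := by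
    intro y
    rw [hfsmem y]
    constructor
    · rintro (hy | hy)
      · rcases hQ4 y ra hy with hcy | rfl | rfl
        · rcases hcases_a with hca | ⟨_, hnf⟩
          · rcases (hRel y a).mpr ⟨ra, hcy, hca⟩ with ⟨c, hc, hyc, hac⟩
            exact Or.inr (Or.inr (Or.inl ⟨c, hc, hyc, hac⟩))
          · exact absurd hcy (hnf y)
        · exact Or.inl rfl
        · exact Or.inr (Or.inl rfl)
      · rcases hQ4 y rb hy with hcy | rfl | rfl
        · rcases hcases_b with hcb | ⟨_, hnf⟩
          · rcases (hRel y b).mpr ⟨rb, hcy, hcb⟩ with ⟨c, hc, hyc, hbc⟩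
            exact Or.inr (Or.inr (Or.inr ⟨c, hc, hyc, hbc⟩))
          · exact absurd hcy (hnf y)
        · exact Or.inl rfl
        · exact Or.inr (Or.inl rfl)
    · rintro (rfl | rfl | ⟨c, hc, hyc, hac⟩ | ⟨c, hc, hyc, hbc⟩)
      · exact Or.inl hQ2a
      · exact Or.inr hQ2b
      · rcases (hRel y a).mp ⟨c, hc, hyc, hac⟩ with ⟨r, hyr, har⟩
        have h1 := hQ3 a r har
        rw [hQ2a] at h1
        injection h1 with h1
        rw [← h1] at hyr
        exact Or.inl (hQ3 y ra hyr)
      · rcases (hRel y b).mp ⟨c, hc, hyc, hbc⟩ with ⟨r, hyr, hbr⟩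
        have h1 := hQ3 b r hbr
        rw [hQ2b] at h1
        injection h1 with h1
        rw [← h1] at hyr
        exact Or.inr (hQ3 y rb hyr)
  -- circles kept by the filter contain neither a nor b
  have hkeep : ∀ c, c ∈ circles.filter
      (fun c => PySem.Set.isdisjoint (PySem.Set.ofList [a, b]) c) →
      c ∈ circles ∧ a ∉ c ∧ b ∉ c := by
    intro c hc
    rcases List.mem_filter.mp hc with ⟨hmem, hpred⟩
    have := (PySem.Set.isdisjoint_iff _ c).mp hpred
    refine ⟨hmem, ?_, ?_⟩
    · exact this a (by rw [PySem.Set.mem_ofList]; simp)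
    · exact this b (by rw [PySem.Set.mem_ofList]; simp)
  -- a kept circle is disjoint from fs
  have hkeepfs : ∀ c, c ∈ circles.filter
      (fun c => PySem.Set.isdisjoint (PySem.Set.ofList [a, b]) c) → pvDisj c fs := by
    intro c hc x hxc hxfs
    rcases hkeep c hc with ⟨hcc, hac, hbc⟩
    rcases (hfsmem x).mp hxfs with rfl | rfl | ⟨d, hd, hxd, had⟩ | ⟨d, hd, hxd, hbd⟩
    · exact hac hxc
    · exact hbc hxc
    · exact hac (pvcircle_unique hA hd hcc hxd hxc ▸ had)
    · exact hbc (pvcircle_unique hA hd hcc hxd hxc ▸ hbd)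
  -- a member of a kept circle keeps its old representative, different from ra/rb
  have hkeeprep : ∀ c, c ∈ circles.filter
      (fun c => PySem.Set.isdisjoint (PySem.Set.ofList [a, b]) c) →
      ∀ x ∈ c, ∀ r, comp.get? x = some r → r ≠ ra ∧ r ≠ rb := by
    intro c hc x hxc r hxr
    rcases hkeep c hc with ⟨hcc, hac, hbc⟩
    constructor
    · intro hre
      rw [hre] at hxr
      rcases hcases_a with hca | ⟨_, hnf⟩
      · rcases (hRel x a).mpr ⟨ra, hxr, hca⟩ with ⟨d, hd, hxd, had⟩
        exact hac (pvcircle_unique hA hd hcc hxd hxc ▸ had)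
      · exact hnf x hxr
    · intro hre
      rw [hre] at hxr
      rcases hcases_b with hcb | ⟨_, hnf⟩
      · rcases (hRel x b).mpr ⟨rb, hxr, hcb⟩ with ⟨d, hd, hxd, hbd⟩
        exact hbc (pvcircle_unique hA hd hcc hxd hxc ▸ hbd)
      · exact hnf x hxr
  refine ⟨hS3, ⟨?_, ?_⟩, ?_⟩
  · -- pairwise disjoint
    rw [List.pairwise_append]
    refine ⟨hA.1.sublist List.filter_sublist, List.pairwise_singleton _ _, ?_⟩
    intro c hc d hd
    rw [List.mem_singleton] at hd
    subst hd
    exact hkeepfs c hc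
  · -- nodup
    intro c hc
    rcases List.mem_append.mp hc with hc | hc
    · exact hA.2 c (List.mem_filter.mp hc).1
    · rw [List.mem_singleton] at hc
      subst hc
      exact hfsnd
  · -- Rel
    intro x y
    constructor
    · rintro ⟨c, hc, hxc, hyc⟩
      rcases List.mem_append.mp hc with hc | hc
      · -- both in a kept circle
        rcases (hRel x y).mp ⟨c, (List.mem_filter.mp hc).1, hxc, hyc⟩ with ⟨r, hxr, hyr⟩
        rcases hkeeprep c hc x hxc r hxr with ⟨hra, hrb⟩
        have hrnu : r ≠ u := by rcases hu with rfl | rfl; exact hra; exact hrb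
        refine ⟨r, ?_, ?_⟩
        · exact (h3 x r hrnu).mpr ⟨hQ3 x r hxr, hra, hrb⟩
        · exact (h3 y r hrnu).mpr ⟨hQ3 y r hyr, hra, hrb⟩
      · -- both in fs
        rw [List.mem_singleton] at hc
        subst hc
        refine ⟨u, ?_, ?_⟩
        · exact (h2 x).mpr ((hS3 x).mpr hxc)
        · exact (h2 y).mpr ((hS3 y).mpr hyc)
    · rintro ⟨r, hxr, hyr⟩
      by_cases hru : r = u
      · subst hru
        refine ⟨fs, List.mem_append.mpr (Or.inr (List.mem_singleton.mpr rfl)), ?_, ?_⟩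
        · exact (hS3 x).mp ((h2 x).mp hxr)
        · exact (hS3 y).mp ((h2 y).mp hyr)
      · rcases (h3 x r hru).mp hxr with ⟨hx2, hra, hrb⟩
        rcases (h3 y r hru).mp hyr with ⟨hy2, _, _⟩
        -- back to the original comp
        have hx0 : comp.get? x = some r := by
          rcases hQ4 x r hx2 with h | rfl | rfl
          · exact h
          · rw [hQ2a] at hx2; exact absurd (by simpa using hx2.symm) hra
          · rw [hQ2b] at hx2; exact absurd (by simpa using hx2.symm) hrb
        have hy0 : comp.get? y = some r := by
          rcases hQ4 y r hy2 with h | rfl | rfl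
          · exact h
          · rw [hQ2a] at hy2; exact absurd (by simpa using hy2.symm) hra
          · rw [hQ2b] at hy2; exact absurd (by simpa using hy2.symm) hrb
        rcases (hRel x y).mpr ⟨r, hx0, hy0⟩ with ⟨c, hc, hxc, hyc⟩
        refine ⟨c, List.mem_append.mpr (Or.inl ?_), hxc, hyc⟩
        rw [List.mem_filter]
        refine ⟨hc, (PySem.Set.isdisjoint_iff _ c).mpr ?_⟩
        intro z hz
        rw [PySem.Set.mem_ofList] at hz
        rcases List.mem_pair.mp hz with rfl | rfl
        · intro hzc
          rcases (hRel x z).mp ⟨c, hc, hxc, hzc⟩ with ⟨r', hxr', hzr'⟩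
          rw [hx0] at hxr'
          injection hxr' with hxr'
          rw [← hxr'] at hzr'
          have := hQ3 z r hzr'
          rw [hQ2a] at this
          exact hra (by simpa using this.symm)
        · intro hzc
          rcases (hRel x z).mp ⟨c, hc, hxc, hzc⟩ with ⟨r', hxr', hzr'⟩
          rw [hx0] at hxr'
          injection hxr' with hxr'
          rw [← hxr'] at hzr'
          have := hQ3 z r hzr'
          rw [hQ2b] at this
          exact hrb (by simpa using this.symm)

def pvOuter (stA : List (PySem.Set Int) × List Int × Int)
    (stB : PySem.Dict Int Int × PySem.Dict Int (List Int) × List Int × Int) : Prop :=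
  pvInvA stA.1 ∧ pvInvB stB.1 stB.2.1 ∧ pvRel stA.1 stB.1 ∧
    stA.2.1 = stB.2.2.1 ∧ stA.2.2 = stB.2.2.2

theorem pvstep (circles : List (PySem.Set Int)) (ansA : List Int) (mxA : Int)
    (comp : PySem.Dict Int Int) (members : PySem.Dict Int (List Int))
    (ansB : List Int) (mxB : Int) (q : List Int)
    (h : pvOuter (circles, ansA, mxA) (comp, members, ansB, mxB)) :
    pvOuter (pvAstep (circles, ansA, mxA) q) (pvBstep (comp, members, ansB, mxB) q) := by
  obtain ⟨hA, hB, hRel, hans, hmax⟩ := h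
  simp only at hA hB hRel hans hmax
  simp only [pvAstep, pvBstep]
  set a := PySem.List.pyGetD q 0 0 with ha_def
  set b := PySem.List.pyGetD q 1 0 with hb_def
  -- ===== A side =====
  obtain ⟨hfsnd, hfsmem0, htemp⟩ :=
    pvinner_spec circles (PySem.Set.ofList [a, b]) [] hA.1 hA.2 (PySem.Set.nodup_ofList _)
  set fs := (circles.foldl
      (fun (s : PySem.Set Int × List (PySem.Set Int)) (circle : PySem.Set Int) =>
        if !(PySem.Set.isdisjoint s.1 circle) then (PySem.Set.update s.1 circle, s.2)
        else (s.1, s.2 ++ [circle])) (PySem.Set.ofList [a, b], [])).1 with hfs_def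
  have hfsmem : ∀ y, y ∈ fs ↔ pvFsMem circles a b y := by
    intro y
    rw [hfsmem0 y]
    unfold pvFsMem
    constructor
    · rintro (hy | ⟨c, hc, ⟨x, hx, hxc⟩, hyc⟩)
      · rcases List.mem_pair.mp ((PySem.Set.mem_ofList _ _).mp hy) with h | h
        · exact Or.inl h
        · exact Or.inr (Or.inl h)
      · rcases List.mem_pair.mp ((PySem.Set.mem_ofList _ _).mp hx) with h | h
        · subst h
          exact Or.inr (Or.inr (Or.inl ⟨c, hc, hyc, hxc⟩))
        · subst h
          exact Or.inr (Or.inr (Or.inr ⟨c, hc, hyc, hxc⟩))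
    · rintro (rfl | rfl | ⟨c, hc, hyc, hac⟩ | ⟨c, hc, hyc, hbc⟩)
      · exact Or.inl ((PySem.Set.mem_ofList _ _).mpr (by simp))
      · exact Or.inl ((PySem.Set.mem_ofList _ _).mpr (by simp))
      · exact Or.inr ⟨c, hc, ⟨a, (PySem.Set.mem_ofList _ _).mpr (by simp), hac⟩, hyc⟩
      · exact Or.inr ⟨c, hc, ⟨b, (PySem.Set.mem_ofList _ _).mpr (by simp), hbc⟩, hyc⟩
  -- ===== B side: the two locates =====
  obtain ⟨hB1, hga1, hmono1, hconv1, hfresh1⟩ := pvlocate_spec comp members a hB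
  set la := pvLocate comp members a with hla_def
  obtain ⟨hB2, hgb2, hmono2, hconv2, hfresh2⟩ := pvlocate_spec la.2.1 la.2.2 b hB1
  set lb := pvLocate la.2.1 la.2.2 b with hlb_def
  set ra := la.1 with hra_def
  set rb := lb.1 with hrb_def
  set comp2 := lb.2.1 with hcomp2_def
  set members2 := lb.2.2 with hmembers2_def
  have hQ2a : comp2.get? a = some ra := hmono2 a ra hga1
  have hQ2b : comp2.get? b = some rb := hgb2
  have hQ3 : ∀ y r, comp.get? y = some r → comp2.get? y = some r :=
    fun y r hy => hmono2 y r (hmono1 y r hy)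
  have hQ4 : ∀ y r, comp2.get? y = some r → comp.get? y = some r ∨ y = a ∨ y = b := by
    intro y r hy
    rcases hconv2 y r hy with hy1 | ⟨rfl, _, _⟩
    · rcases hconv1 y r hy1 with hy0 | ⟨rfl, _, _⟩
      · exact Or.inl hy0
      · exact Or.inr (Or.inl rfl)
    · exact Or.inr (Or.inr rfl)
  have hQ7a : comp.get? a = none → ra = a := hfresh1
  have hQ7b : comp.get? b = none → rb = b := by
    intro hcb
    rcases hc1 : la.2.1.get? b with _ | s
    · exact hfresh2 hc1
    · have hrb : rb = s := by
        rw [hrb_def, hlb_def, pvLocate, hc1]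
      rcases hconv1 b s hc1 with hy0 | ⟨hba, hsa, hcan⟩
      · rw [hcb] at hy0; cases hy0
      · rw [hrb, hsa, ← hba]
  -- representatives are their own representatives in comp2
  have hselfra : comp2.get? ra = some ra := by
    rcases Option.isSome_iff_exists.mp (hB2.2.1 a ra hQ2a) with ⟨m, hm⟩
    exact hB2.2.2 ra m hm
  have hselfrb : comp2.get? rb = some rb := by
    rcases Option.isSome_iff_exists.mp (hB2.2.1 b rb hQ2b) with ⟨m, hm⟩
    exact hB2.2.2 rb m hm
  have hmaxeq : ∀ (m s : Int), max m s = if s > m then s else m := by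
    intro m s
    by_cases hms : s > m
    · rw [if_pos hms, max_eq_right hms.le]
    · rw [if_neg hms, max_eq_left (not_lt.mp hms)]
  have hlenA : PySem.Set.len fs = (fs.length : Int) := rfl
  by_cases hrr : ra = rb
  · -- no merge
    rw [if_neg (by simpa using hrr)]
    obtain ⟨hS3, hA', hRel'⟩ := pvabstract_step circles comp members a b ra rb ra comp2 comp2 fs
      hA hB hRel hQ2a hQ2b hQ3 hQ4 hQ7a hQ7b (Or.inl rfl)
      (by intro y; rw [← hrr]; exact ⟨fun hh => Or.inl hh, fun hh => hh.elim id id⟩)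
      (by intro y r hr; rw [← hrr]; exact ⟨fun hh => ⟨hh, hr, hr⟩, fun hh => hh.1⟩)
      hfsnd hfsmem
    rcases Option.isSome_iff_exists.mp (hB2.2.1 a ra hQ2a) with ⟨m, hm⟩
    obtain ⟨hmnd, hmmem⟩ := hB2.1 ra m hm
    have hgd : members2.getD ra [] = m := by
      rw [PySem.Dict.getD_eq_get?_getD, hm]; rfl
    have hlen : fs.length = m.length :=
      ((List.perm_ext_iff_of_nodup hfsnd hmnd).mpr (fun y => by
        rw [hmmem y]
        constructor
        · intro hy
          rcases (hS3 y).mpr hy with hh | hh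
          · exact hh
          · rw [hrr]; exact hh
        · intro hy
          exact (hS3 y).mp (Or.inl hy))).length_eq
    unfold pvOuter
    refine ⟨?_, ?_, ?_, ?_, ?_⟩
    · simp only
      rw [htemp, List.nil_append]
      exact hA'
    · simp only
      exact hB2
    · simp only
      rw [htemp, List.nil_append]
      exact hRel'
    · simp only
      rw [hans, hmax, hmaxeq]
      rw [hlenA, hgd, hlen]
    · simp only
      rw [hmax, hmaxeq]
      rw [hlenA, hgd, hlen]
  · -- merge
    rw [if_pos (by simpa using hrr)]
    by_cases hsw : (members2.getD ra []).length < (members2.getD rb []).length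
    · -- swap: keep rb, drop ra
      rw [if_pos hsw]
      simp only [if_pos hsw]
      obtain ⟨hFB, h2', h3', hgdu, hndsum, hmemsum⟩ :=
        pvmerge_spec comp2 members2 rb ra hB2 (fun hh => hrr hh.symm) hselfrb hselfra
      obtain ⟨hS3, hA', hRel'⟩ := pvabstract_step circles comp members a b ra rb rb comp2
        ((members2.getD ra []).foldl (fun c x => c.insert x rb) comp2) fs
        hA hB hRel hQ2a hQ2b hQ3 hQ4 hQ7a hQ7b (Or.inr rfl)
        (by intro y; rw [h2' y]; exact Or.comm)
        (by
          intro y r hru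
          rw [h3' y r hru]
          constructor
          · rintro ⟨hh, hra⟩
            exact ⟨hh, hra, hru⟩
          · rintro ⟨hh, hra, _⟩
            exact ⟨hh, hra⟩)
        hfsnd hfsmem
      have hlen : fs.length = (members2.getD rb [] ++ members2.getD ra []).length :=
        ((List.perm_ext_iff_of_nodup hfsnd hndsum).mpr (fun y => by
          rw [hmemsum y]
          constructor
          · intro hy
            exact ((hS3 y).mpr hy).symm
          · intro hy
            exact (hS3 y).mp hy.symm)).length_eq
      unfold pvOuter
      refine ⟨?_, ?_, ?_, ?_, ?_⟩
      · simp only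
        rw [htemp, List.nil_append]
        exact hA'
      · simp only
        exact hFB
      · simp only
        rw [htemp, List.nil_append]
        exact hRel'
      · simp only
        rw [hans, hmax, hmaxeq]
        rw [hlenA, hgdu, hlen]
      · simp only
        rw [hmax, hmaxeq]
        rw [hlenA, hgdu, hlen]
    · -- no swap: keep ra, drop rb
      rw [if_neg hsw]
      simp only [if_neg hsw]
      obtain ⟨hFB, h2', h3', hgdu, hndsum, hmemsum⟩ :=
        pvmerge_spec comp2 members2 ra rb hB2 hrr hselfra hselfrb
      obtain ⟨hS3, hA', hRel'⟩ := pvabstract_step circles comp members a b ra rb ra comp2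
        ((members2.getD rb []).foldl (fun c x => c.insert x ra) comp2) fs
        hA hB hRel hQ2a hQ2b hQ3 hQ4 hQ7a hQ7b (Or.inl rfl)
        (by intro y; rw [h2' y])
        (by
          intro y r hru
          rw [h3' y r hru]
          constructor
          · rintro ⟨hh, hrb⟩
            exact ⟨hh, hru, hrb⟩
          · rintro ⟨hh, _, hrb⟩
            exact ⟨hh, hrb⟩)
        hfsnd hfsmem
      have hlen : fs.length = (members2.getD ra [] ++ members2.getD rb []).length :=
        ((List.perm_ext_iff_of_nodup hfsnd hndsum).mpr (fun y => by
          rw [hmemsum y]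
          constructor
          · intro hy
            exact ((hS3 y).mpr hy)
          · intro hy
            exact (hS3 y).mp hy)).length_eq
      unfold pvOuter
      refine ⟨?_, ?_, ?_, ?_, ?_⟩
      · simp only
        rw [htemp, List.nil_append]
        exact hA'
      · simp only
        exact hFB
      · simp only
        rw [htemp, List.nil_append]
        exact hRel'
      · simp only
        rw [hans, hmax, hmaxeq]
        rw [hlenA, hgdu, hlen]
      · simp only
        rw [hmax, hmaxeq]
        rw [hlenA, hgdu, hlen]

theorem pvfold (queries : List (List Int)) (stA : List (PySem.Set Int) × List Int × Int)
    (stB : PySem.Dict Int Int × PySem.Dict Int (List Int) × List Int × Int)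
    (h : pvOuter stA stB) :
    pvOuter (queries.foldl pvAstep stA) (queries.foldl pvBstep stB) := by
  induction queries generalizing stA stB with
  | nil => exact h
  | cons q t ih =>
    simp only [List.foldl_cons]
    rcases stA with ⟨c, ans, mx⟩
    rcases stB with ⟨cm, mem, ansb, mxb⟩
    exact ih _ _ (pvstep c ans mx cm mem ansb mxb q h)

theorem pvinit : pvOuter ([], [], 0) (PySem.Dict.empty, PySem.Dict.empty, [], 0) := by
  refine ⟨⟨List.Pairwise.nil, by simp⟩, ⟨?_, ?_, ?_⟩, ?_, rfl, rfl⟩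
  · intro r m hm
    simp [PySem.Dict.get?_empty] at hm
  · intro x r hx
    simp [PySem.Dict.get?_empty] at hx
  · intro r m hm
    simp [PySem.Dict.get?_empty] at hm
  · intro x y
    constructor
    · rintro ⟨c, hc, _⟩
      cases hc
    · rintro ⟨r, hr, _⟩
      simp [PySem.Dict.get?_empty] at hr

theorem pvmain (queries : List (List Int)) :
    (queries.foldl pvAstep ([], [], 0)).2.1
      = (queries.foldl pvBstep (PySem.Dict.empty, PySem.Dict.empty, [], 0)).2.2.1 :=
  (pvfold queries _ _ pvinit).2.2.2.1

-- ===== VERDICT (by name: the statement is the Claim_ definition above) =====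
theorem max_circle_temp_spec : Claim_equal_max_circle_temp := by
  intro queries _ _
  unfold Spec_max_circle_temp max_circle_temp max_circle_temp_alt
  exact pvmain queries
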